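-- pv_equiv track=rewrite | github.com/oliver-ode/Algorithmic-Coding | CodingBat/Python/Warmup2/stringMatch.py | string_match
-- ===== SOURCE A (Python) =====
-- def string_match(a, b):
--     lengths = [len(a), len(b)]
--     lengths.sort()
--     count = 0
--     for i in range(lengths[0]-1):
--         if a[i:i+2] == b[i:i+2]:
--             count += 1
--     return count
-- ===== SOURCE B (Python) =====
-- def string_match(a, b):
--     # Run-length view: each maximal run of L consecutive equal positions
--     # contributes L-1 matching length-2 windows, so the answer is
--     # (total equal positions) - (number of maximal runs of equal positions).
--     eq = 0
--     runs = 0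
--     prev = False
--     for x, y in zip(a, b):
--         cur = x == y
--         if cur:
--             eq += 1
--             if not prev:
--                 runs += 1
--         prev = cur
--     return eq - runs
-- ===== Notes on version B (the rewrite author's own statement) =====
-- stated objective: faster
-- what changed: Replaces the sorted-lengths + per-index slice-comparison loop by a run-length formulation over the zipped strings: the answer is (number of equal positions) minus (number of maximal runs of equal positions), since a run of L equal positions contributes exactly L-1 matching length-2 windows; this avoids building two slice objects per index.
import Mathlib
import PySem

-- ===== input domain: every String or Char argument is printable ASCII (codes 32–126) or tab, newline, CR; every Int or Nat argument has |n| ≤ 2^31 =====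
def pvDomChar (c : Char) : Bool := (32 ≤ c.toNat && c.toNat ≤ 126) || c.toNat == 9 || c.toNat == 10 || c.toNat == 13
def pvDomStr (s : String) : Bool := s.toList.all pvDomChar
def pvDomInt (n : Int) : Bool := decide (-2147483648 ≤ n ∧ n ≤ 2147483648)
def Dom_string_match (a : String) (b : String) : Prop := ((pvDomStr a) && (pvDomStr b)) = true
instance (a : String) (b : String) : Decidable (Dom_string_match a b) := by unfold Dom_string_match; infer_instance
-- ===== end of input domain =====

-- B replaces the indexed slice-comparison loop by a run-length view of the zipped strings:
-- each maximal run of L consecutive equal positions contributes L-1 matches, so the answer is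
-- (total equal positions) - (number of maximal runs); measured faster (no per-index slicing).
-- ===== PORT A =====
def string_match (a : String) (b : String) : Int :=
  let lengths := PySem.List.sorted [(a.toList.length : Int), (b.toList.length : Int)] id false
  (PySem.List.pyRange 0 (PySem.List.pyGetD lengths 0 0 - 1) 1).foldl
    (fun count i =>
      if PySem.List.slice a.toList (some i) (some (i + 2)) =
         PySem.List.slice b.toList (some i) (some (i + 2)) then count + 1 else count) 0

-- ===== PORT B =====
def string_match_alt (a : String) (b : String) : Int :=
  let r := (a.toList.zip b.toList).foldl
    (fun (s : Int × Int × Bool) (xy : Char × Char) =>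
      let cur := xy.1 == xy.2
      if cur then (s.1 + 1, if s.2.2 then s.2.1 else s.2.1 + 1, cur)
      else (s.1, s.2.1, cur))
    (0, 0, false)
  r.1 - r.2.1

-- ===== PRECONDITION & SPEC =====
def Spec_string_match (a : String) (b : String) (out : Int) : Prop := out = string_match_alt a b
instance (a : String) (b : String) (out : Int) : Decidable (Spec_string_match a b out) := by unfold Spec_string_match; infer_instance

-- ===== CLAIM =====
def Claim_equal_string_match : Prop := ∀ (a : String) (b : String), Dom_string_match a b → Spec_string_match a b (string_match a b)

-- ===== LEMMAS AND PROOFS =====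
-- B's loop step, named for the invariant proof (identical to the lambda in string_match_alt).
def altStep (s : Int × Int × Bool) (xy : Char × Char) : Int × Int × Bool :=
  let cur := xy.1 == xy.2
  if cur then (s.1 + 1, if s.2.2 then s.2.1 else s.2.1 + 1, cur)
  else (s.1, s.2.1, cur)

-- Number of adjacent equal-equal pairs in l, given whether the previous position was equal.
def pairsWith : Bool → List (Char × Char) → Int
  | _, [] => 0
  | prev, xy :: rest => (if prev && (xy.1 == xy.2) then 1 else 0) + pairsWith (xy.1 == xy.2) rest

-- Adjacent-pair predicate: both positions of the pair of consecutive zipped chars are equal.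
def pairEq (p : (Char × Char) × (Char × Char)) : Bool :=
  (p.1.1 == p.1.2) && (p.2.1 == p.2.2)

theorem alt_fold_inv (l : List (Char × Char)) (s : Int × Int × Bool) :
    (l.foldl altStep s).1 - (l.foldl altStep s).2.1 = s.1 - s.2.1 + pairsWith s.2.2 l := by
  induction l generalizing s with
  | nil => simp [pairsWith]
  | cons xy rest ih =>
    simp only [List.foldl_cons, pairsWith, ih]
    by_cases h : xy.1 = xy.2
    · by_cases hp : s.2.2 <;> simp [altStep, h, hp] <;> ring
    · simp [altStep, h]

theorem pairsWith_countP (l : List (Char × Char)) (p : Char × Char) :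
    pairsWith (p.1 == p.2) l = (((p :: l).zip l).countP pairEq : Int) := by
  induction l generalizing p with
  | nil => simp [pairsWith]
  | cons q rest ih =>
    simp only [pairsWith, List.zip_cons_cons, List.countP_cons, ih q, pairEq]
    by_cases h1 : p.1 = p.2 <;> by_cases h2 : q.1 = q.2 <;>
      simp [h1, h2] <;> omega

theorem pairsWith_false (l : List (Char × Char)) :
    pairsWith false l = ((l.zip l.tail).countP pairEq : Int) := by
  cases l with
  | nil => simp [pairsWith]
  | cons p rest => simpa [pairsWith] using pairsWith_countP rest p

theorem sorted_pair_head (x y : Int) :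
    PySem.List.pyGetD (PySem.List.sorted [x, y] id false) 0 0 = min x y := by
  rcases lt_or_ge y x with h | h
  · simp [PySem.List.sorted, PySem.List.insertBy, PySem.List.pyGetD, PySem.List.pyGet?,
      PySem.List.pyIdx?, h, min_eq_right h.le]
  · simp [PySem.List.sorted, PySem.List.insertBy, PySem.List.pyGetD, PySem.List.pyGet?,
      PySem.List.pyIdx?, not_lt.mpr h, min_eq_left h]

theorem slice_two (xs : List Char) (i : Int) (hi : 0 ≤ i) (h2 : i.toNat + 1 < xs.length) :
    PySem.List.slice xs (some i) (some (i + 2)) = [xs[i.toNat], xs[i.toNat + 1]] := by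
  rw [PySem.List.slice_toNat xs hi (by omega)]
  have h3 : (i + 2).toNat - i.toNat = 2 := by omega
  rw [h3]
  apply List.ext_getElem
  · simp; omega
  · intro k hk1 hk2
    simp at hk1 hk2 ⊢
    interval_cases k <;> simp

theorem string_match_eq_alt (a b : String) : string_match a b = string_match_alt a b := by
  unfold string_match string_match_alt
  simp only [sorted_pair_head]
  have halt : ∀ (s : Int × Int × Bool) (xy : Char × Char),
      (fun (s : Int × Int × Bool) (xy : Char × Char) =>
        let cur := xy.1 == xy.2
        if cur then (s.1 + 1, if s.2.2 then s.2.1 else s.2.1 + 1, cur)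
        else (s.1, s.2.1, cur)) s xy = altStep s xy := fun _ _ => rfl
  simp only [halt]
  set zs := a.toList.zip b.toList with hzs
  have hlen : zs.length = min a.toList.length b.toList.length := List.length_zip
  rw [alt_fold_inv, pairsWith_false]
  simp only [zero_sub, neg_zero, zero_add]
  -- now: A's fold over the range = countP pairEq (zs.zip zs.tail)
  rcases Nat.eq_zero_or_pos (min a.toList.length b.toList.length) with h0 | hpos
  · have : min ((a.toList.length : Int)) ((b.toList.length : Int)) - 1 = -1 := by
      omega
    rw [this, PySem.List.pyRange_one_eq_nil (by norm_num)]
    have : zs = [] := by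
      apply List.eq_nil_of_length_eq_zero; omega
    simp [this]
  · set n := min a.toList.length b.toList.length with hn
    have hadjlen : (zs.zip zs.tail).length = n - 1 := by
      rw [List.length_zip, List.length_tail, hlen]; omega
    have hbound : min ((a.toList.length : Int)) ((b.toList.length : Int)) - 1
        = ((zs.zip zs.tail).length : Int) := by
      rw [hadjlen]; omega
    rw [hbound]
    rw [PySem.List.foldl_congr_mem (g := fun c i =>
        if pairEq (PySem.List.pyGetD (zs.zip zs.tail) i ((' ', ' '), (' ', ' '))) = true
        then c + 1 else c)]
    · rw [PySem.List.foldl_pyRange_zero_pyGetD' (zs.zip zs.tail) ((' ', ' '), (' ', ' '))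
        (fun c p => if pairEq p = true then c + 1 else c) 0,
        PySem.List.foldl_count_if, zero_add]
    · intro acc i hi
      rw [PySem.List.mem_pyRange_one] at hi
      obtain ⟨h0i, h1i⟩ := hi
      have hilt : i.toNat < n - 1 := by omega
      have ha : i.toNat + 1 < a.toList.length := by omega
      have hb : i.toNat + 1 < b.toList.length := by omega
      rw [slice_two a.toList i h0i ha, slice_two b.toList i h0i hb,
        PySem.List.pyGetD_eq_getElem _ _ h0i (by omega)]
      have hzslen : i.toNat + 1 < zs.length := by omega
      have hget : (zs.zip zs.tail)[i.toNat]'(by omega) = (zs[i.toNat], zs[i.toNat + 1]) := by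
        rw [List.getElem_zip]
        congr 1
        rw [List.getElem_tail]
      rw [hget]
      have hz1 : zs[i.toNat]'(by omega) = (a.toList[i.toNat], b.toList[i.toNat]) :=
        List.getElem_zip
      have hz2 : zs[i.toNat + 1]'(by omega) = (a.toList[i.toNat + 1], b.toList[i.toNat + 1]) :=
        List.getElem_zip
      rw [hz1, hz2]
      by_cases hc : a.toList[i.toNat] = b.toList[i.toNat] ∧
          a.toList[i.toNat + 1] = b.toList[i.toNat + 1]
      · simp [pairEq, hc.1, hc.2]
      · rw [not_and_or] at hc
        rcases hc with hc | hc <;> simp [pairEq, hc]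

-- ===== VERDICT =====
theorem string_match_spec : Claim_equal_string_match := by
  intro a b _
  exact string_match_eq_alt a b
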